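-- pv_equiv track=rewrite | github.com/RomainGehrig/AdventOfCode | 2015/day8/size.py | process
-- ===== SOURCE A (Python) =====
-- def process(l):
--     s = []
--     for c in l:
--         if c in "\"\\":
--             s.append("\\%s" % c)
--         else:
--             s.append(c)
--     return "".join(s)
-- ===== SOURCE B (Python) =====
-- def process(l):
--     # Escape backslashes first, then quotes: two whole-string library passes.
--     return l.replace("\\", "\\\\").replace('"', '\\"')
-- ===== Notes on version B (the rewrite author's own statement) =====
-- stated objective: idiomatic
-- what changed: Replaced the per-character loop with list accumulator and join by two ordered whole-string str.replace passes (backslash first, then quote); the C-level replace loops make it measurably faster.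
import Mathlib
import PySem

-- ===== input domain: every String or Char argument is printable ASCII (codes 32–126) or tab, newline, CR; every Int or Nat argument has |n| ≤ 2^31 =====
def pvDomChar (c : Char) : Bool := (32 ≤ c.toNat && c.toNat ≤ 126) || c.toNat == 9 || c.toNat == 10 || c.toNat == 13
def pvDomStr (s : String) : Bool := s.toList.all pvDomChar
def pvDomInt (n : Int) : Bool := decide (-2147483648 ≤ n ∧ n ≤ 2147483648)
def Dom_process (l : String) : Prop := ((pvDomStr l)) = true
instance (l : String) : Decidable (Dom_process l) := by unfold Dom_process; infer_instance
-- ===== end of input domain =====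

-- B replaces A's per-character loop with two ordered whole-string replace passes (idiomatic).

-- ===== PORT A =====
-- for c in l: append "\\"+c if c in "\"\\" else c; "".join(s)
def process (l : String) : String :=
  let s : List (List Char) :=
    l.toList.foldl (fun s c =>
      s ++ [if PySem.Chars.isIn [c] ['"', '\\'] then ['\\', c] else [c]]) []
  String.ofList (PySem.Chars.join [] s)

-- ===== PORT B =====
-- l.replace("\\", "\\\\").replace('"', '\\"')
def process_alt (l : String) : String :=
  PySem.Str.replace (PySem.Str.replace l "\\" "\\\\") "\"" "\\\""

-- ===== PRECONDITION & SPEC =====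
def Spec_process (l : String) (out : String) : Prop := out = process_alt l
instance (l : String) (out : String) : Decidable (Spec_process l out) := by unfold Spec_process; infer_instance

-- ===== CLAIM (what is proved, stated in full; the proofs are below) =====
def Claim_equal_process : Prop := ∀ (l : String), Dom_process l → Spec_process l (process l)

-- ===== LEMMAS AND PROOFS =====

-- single-character escaping function both sides reduce to
def pvEsc (c : Char) : List Char :=
  if c = '\\' then ['\\', '\\'] else if c = '"' then ['\\', '"'] else [c]

lemma infix_singleton_mem {α : Type} (c : α) (s : List α) : [c] <:+: s ↔ c ∈ s := by
  constructor
  · intro h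
    exact List.singleton_sublist.mp h.sublist
  · intro h
    obtain ⟨a, b, rfl⟩ := List.append_of_mem h
    exact ⟨a, b, by simp⟩

lemma join_nil_eq_flatten (parts : List (List Char)) :
    PySem.Chars.join [] parts = parts.flatten := by
  induction parts with
  | nil => rfl
  | cons p ps ih =>
    cases ps with
    | nil => simp [PySem.Chars.join, List.intercalate]
    | cons q qs =>
      simp [PySem.Chars.join, List.intercalate, List.intersperse] at *
      simpa using ih

lemma replace_go_single (o : Char) (new : List Char) :
    ∀ (l acc : List Char) (fuel : Nat), l.length ≤ fuel →
      PySem.Chars.replace.go [o] new fuel l acc =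
        acc.reverse ++ l.flatMap (fun c => if c = o then new else [c]) := by
  intro l
  induction l with
  | nil =>
    intro acc fuel _
    cases fuel <;> simp [PySem.Chars.replace.go]
  | cons c t ih =>
    intro acc fuel hf
    cases fuel with
    | zero => simp at hf
    | succ f =>
      simp only [List.length_cons, Nat.succ_le_succ_iff] at hf
      by_cases hco : o = c
      · subst hco
        simp only [PySem.Chars.replace.go, List.isPrefixOf, beq_self_eq_true, Bool.true_and,
          List.isPrefixOf_nil_left, if_pos]
        rw [show List.drop [o].length (o :: t) = t from rfl, ih _ _ hf]
        simp
      · have hpre : [o].isPrefixOf (c :: t) = false := by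
          simp [List.isPrefixOf, hco]
        simp only [PySem.Chars.replace.go, hpre, Bool.false_eq_true, if_false]
        rw [ih _ _ hf]
        have : ¬ c = o := fun h => hco h.symm
        simp [this]

lemma replace_single (s : List Char) (o : Char) (new : List Char) :
    PySem.Chars.replace s [o] new = s.flatMap (fun c => if c = o then new else [c]) := by
  unfold PySem.Chars.replace
  simp only [List.isEmpty_cons, Bool.false_eq_true, if_false]
  simpa using replace_go_single o new s [] s.length (le_refl _)

lemma flatten_flatMap_singleton (l : List Char) (f : Char → List Char) :
    (l.flatMap (fun c => [f c])).flatten = l.flatMap f := by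
  induction l with
  | nil => rfl
  | cons c t ih => simp [ih]

lemma A_eq_esc (l : List Char) :
    (l.foldl (fun s c =>
      s ++ [if PySem.Chars.isIn [c] ['"', '\\'] then ['\\', c] else [c]]) []).flatten
    = l.flatMap pvEsc := by
  rw [PySem.List.foldl_append_eq_flatMap
    (g := fun c => [if PySem.Chars.isIn [c] ['"', '\\'] then ['\\', c] else [c]]) l []]
  rw [List.nil_append, flatten_flatMap_singleton]
  apply List.flatMap_congr
  intro c _
  by_cases h : PySem.Chars.isIn [c] ['"', '\\'] = true
  · have hm := (infix_singleton_mem c _).mp ((PySem.Chars.isIn_iff_infix _ _).mp h)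
    simp only [List.mem_cons, List.not_mem_nil, or_false] at hm
    rcases hm with h' | h' <;> subst h' <;> decide
  · have hm : c ∉ ['"', '\\'] := fun hc =>
      h ((PySem.Chars.isIn_iff_infix _ _).mpr ((infix_singleton_mem c _).mpr hc))
    simp only [List.mem_cons, List.not_mem_nil, or_false, not_or] at hm
    simp [h, pvEsc, hm.1, hm.2]

lemma B_eq_esc (l : List Char) :
    PySem.Chars.replace (PySem.Chars.replace l ['\\'] ['\\', '\\']) ['"'] ['\\', '"']
    = l.flatMap pvEsc := by
  rw [replace_single, replace_single, List.flatMap_assoc]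
  apply List.flatMap_congr
  intro c _
  by_cases h1 : c = '\\'
  · subst h1; simp [pvEsc]
  · by_cases h2 : c = '"'
    · subst h2; simp [pvEsc]
    · simp [pvEsc, h1, h2]

-- ===== VERDICT (by name: the statement is the Claim_ definition above) =====
theorem process_spec : Claim_equal_process := by
  intro l _
  unfold Spec_process process process_alt
  apply String.toList_injective
  simp only [PySem.Str.toList_replace, String.toList_ofList]
  rw [join_nil_eq_flatten, A_eq_esc,
    show ("\\" : String).toList = ['\\'] from rfl,
    show ("\\\\" : String).toList = ['\\', '\\'] from rfl,
    show ("\"" : String).toList = ['"'] from rfl,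
    show ("\\\"" : String).toList = ['\\', '"'] from rfl,
    B_eq_esc]
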